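-- pv_equiv track=rewrite | github.com/vhehduatks/Git_Shin_Hyeong_Hwan | Algorithms/QUANTIZE.py | partsum
-- ===== SOURCE A (Python) =====
-- def partsum(nums):
--     S=list()
--     SS=list()
--     sum=0
--     for i in nums:
--         sum+=i
--         S.append(sum)
--         SS.append(sum*sum)
--
--     return S,SS
-- ===== SOURCE B (Python) =====
-- def partsum(nums):
--     # Compute the grand total first, then peel elements from the right:
--     # the prefix sum ending at position i equals total minus the suffix after i.
--     total = sum(nums)
--     S = []
--     for x in reversed(nums):
--         S.append(total)
--         total -= x
--     S.reverse()
--     SS = [s * s for s in S]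
--     return S, SS
--
-- if __name__ == "__main__":
--     print(partsum([1,2,3]), partsum([]), partsum([-5, 2]))
-- ===== Notes on version B (the rewrite author's own statement) =====
-- stated objective: alternative
-- what changed: B computes the grand total once, then walks the list in reverse deriving each prefix sum by subtracting the suffix elements from the maintained total, building S back-to-front and reversing it, then squares S in a separate pass; A walks left-to-right with a running-sum accumulator appending both lists interleaved.
import Mathlib
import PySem

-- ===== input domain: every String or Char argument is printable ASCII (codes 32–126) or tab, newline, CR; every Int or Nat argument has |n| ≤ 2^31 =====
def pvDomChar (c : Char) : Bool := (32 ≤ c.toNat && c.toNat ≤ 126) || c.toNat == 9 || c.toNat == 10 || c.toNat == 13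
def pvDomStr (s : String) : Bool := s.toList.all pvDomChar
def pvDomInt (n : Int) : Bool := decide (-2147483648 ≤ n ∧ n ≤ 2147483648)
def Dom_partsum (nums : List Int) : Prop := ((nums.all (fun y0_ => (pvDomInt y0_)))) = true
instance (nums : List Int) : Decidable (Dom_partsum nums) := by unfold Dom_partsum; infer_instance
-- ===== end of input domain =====

-- B computes the total first and derives each prefix sum right-to-left by subtraction,
-- building S back-to-front; A keeps a left-to-right running sum. Alternative decomposition, same cost.

-- ===== PORT A =====
-- A: one loop over nums with state (S, SS, sum), appending sum and sum*sum each step.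
def partsum (nums : List Int) : List Int × List Int :=
  let st := nums.foldl
    (fun (st : List Int × List Int × Int) i =>
      let sum := st.2.2 + i
      (st.1 ++ [sum], st.2.1 ++ [sum * sum], sum))
    ([], [], 0)
  (st.1, st.2.1)

-- ===== PORT B =====
-- B: total = sum(nums); loop over reversed(nums) with state (S, total), appending total then
-- subtracting x; reverse S; square in a second pass.
def partsum_alt (nums : List Int) : List Int × List Int :=
  let st := nums.reverse.foldl
    (fun (st : List Int × Int) x => (st.1 ++ [st.2], st.2 - x))
    ([], nums.sum)
  let S := st.1.reverse
  let SS := S.map (fun s => s * s)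
  (S, SS)

-- ===== PRECONDITION & SPEC =====
def Spec_partsum (nums : List Int) (out : List Int × List Int) : Prop := out = partsum_alt nums
instance (nums : List Int) (out : List Int × List Int) : Decidable (Spec_partsum nums out) := by unfold Spec_partsum; infer_instance

-- ===== CLAIM (what is proved, stated in full; the proofs are below) =====
def Claim_equal_partsum : Prop := ∀ (nums : List Int), Dom_partsum nums → Spec_partsum nums (partsum nums)

-- ===== LEMMAS AND PROOFS =====

-- prefix sums starting from accumulator s (characterises A's loop)
def pvAccum (s : Int) : List Int → List Int
  | [] => []
  | i :: t => (s + i) :: pvAccum (s + i) t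

-- descending totals starting from t (characterises B's reverse loop)
def pvSuf (t : Int) : List Int → List Int
  | [] => []
  | x :: l => t :: pvSuf (t - x) l

theorem partsum_fold_eq (nums : List Int) (S SS : List Int) (s : Int) :
    nums.foldl
      (fun (st : List Int × List Int × Int) i =>
        let sum := st.2.2 + i
        (st.1 ++ [sum], st.2.1 ++ [sum * sum], sum))
      (S, SS, s)
    = (S ++ pvAccum s nums, SS ++ (pvAccum s nums).map (fun x => x * x), s + nums.sum) := by
  induction nums generalizing S SS s with
  | nil => simp [pvAccum]
  | cons i t ih =>
    simp only [List.foldl, pvAccum, ih, List.map, List.sum_cons]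
    refine Prod.ext (by simp) (Prod.ext (by simp) ?_)
    simp; ring

theorem alt_fold_eq (l : List Int) (S : List Int) (t : Int) :
    l.foldl (fun (st : List Int × Int) x => (st.1 ++ [st.2], st.2 - x)) (S, t)
      = (S ++ pvSuf t l, t - l.sum) := by
  induction l generalizing S t with
  | nil => simp [pvSuf]
  | cons x xs ih =>
    simp only [List.foldl, pvSuf, ih, List.sum_cons]
    refine Prod.ext (by simp) ?_
    simp; ring

theorem pvSuf_append (t : Int) (l1 l2 : List Int) :
    pvSuf t (l1 ++ l2) = pvSuf t l1 ++ pvSuf (t - l1.sum) l2 := by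
  induction l1 generalizing t with
  | nil => simp [pvSuf]
  | cons x xs ih => simp only [List.cons_append, pvSuf, ih, List.sum_cons]; ring_nf

theorem pvAccum_reverse (nums : List Int) (s : Int) :
    (pvAccum s nums).reverse = pvSuf (s + nums.sum) nums.reverse := by
  induction nums generalizing s with
  | nil => simp [pvAccum, pvSuf]
  | cons i t ih =>
    simp only [pvAccum, List.reverse_cons, List.sum_cons]
    rw [pvSuf_append, ih, List.sum_reverse]
    have e1 : s + (i + t.sum) = s + i + t.sum := by ring
    have e2 : s + i + t.sum - t.sum = s + i := by ring
    rw [e1, e2]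
    simp [pvSuf]

-- ===== VERDICT (by name: the statement is the Claim_ definition above) =====
theorem partsum_spec : Claim_equal_partsum := by
  intro nums _
  have hS : (pvSuf nums.sum nums.reverse).reverse = pvAccum 0 nums := by
    have h := pvAccum_reverse nums 0
    rw [zero_add] at h
    rw [← h, List.reverse_reverse]
  show partsum nums = partsum_alt nums
  simp only [partsum, partsum_alt, partsum_fold_eq, alt_fold_eq, List.nil_append]
  rw [hS]
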